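-- pv_equiv track=rewrite | github.com/chaeha617/AlgorithmStudy | ChaeHa_Python/20240722pccp/no1.py | solution
-- ===== SOURCE A (Python) =====
-- def solution(input_string):
--     answer = []
--     stack = [input_string[0]]
--     for al in input_string:
--         if stack[-1] !=al:
--             stack.append(al)
--
--     for i in set(stack):
--         if stack.count(i) >= 2:
--             answer.append(i)
--     if answer == []:
--         return "N"
--     answer.sort()
--     return "".join(answer)
-- ===== SOURCE B (Python) =====
-- def solution(input_string):
--     answer = "".join(
--         c for c in sorted(set(input_string))
--         if sum(1 for i, ch in enumerate(input_string)
--                if ch == c and (i == 0 or input_string[i - 1] != c)) >= 2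
--     )
--     return answer if answer else "N"
-- ===== Notes on version B (the rewrite author's own statement) =====
-- stated objective: alternative
-- what changed: Instead of A's compress-then-count (build the collapsed run list with a stack, then rescan it with .count for each distinct char), B never materialises any run list: it iterates the sorted distinct characters and, for each candidate, scans the original string once counting its run starts (positions i with s[i]==c and (i==0 or s[i-1]!=c)).
import Mathlib
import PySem

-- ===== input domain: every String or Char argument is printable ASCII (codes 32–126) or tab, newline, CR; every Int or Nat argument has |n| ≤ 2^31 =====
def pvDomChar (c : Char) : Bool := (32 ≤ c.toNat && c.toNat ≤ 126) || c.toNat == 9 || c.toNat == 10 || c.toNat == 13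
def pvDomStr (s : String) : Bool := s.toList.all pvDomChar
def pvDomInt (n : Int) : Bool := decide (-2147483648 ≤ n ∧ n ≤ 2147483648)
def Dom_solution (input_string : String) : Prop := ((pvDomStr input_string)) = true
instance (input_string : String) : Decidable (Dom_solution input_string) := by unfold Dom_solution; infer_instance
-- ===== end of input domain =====

-- B drops A's collapsed run list entirely: for each sorted distinct character it scans the
-- original string counting that character's run starts (alternative decomposition, same cost).

-- ===== PORT A =====
def solution (input_string : String) : String :=
  let cs := input_string.toList
  let stack := cs.foldl
    (fun st al => if PySem.List.pyGetD st (-1) ' ' ≠ al then st ++ [al] else st)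
    [PySem.List.pyGetD cs 0 ' ']
  let answer := (PySem.Set.ofList stack).foldl
    (fun ans i => if 2 ≤ stack.count i then ans ++ [i] else ans) []
  if answer = [] then "N"
  else String.ofList (PySem.List.sorted answer (fun x => x) false)

-- ===== PORT B =====
-- sum(1 for … if cond) is countP; string indexing input_string[i-1] is pyGetD on its char list
-- (always in range when reached: the `or` shortcut has already ruled out i == 0).
def solution_alt (input_string : String) : String :=
  let cs := input_string.toList
  let answer := (PySem.List.sorted (PySem.Set.ofList cs) (fun x => x) false).filter
    (fun c => 2 ≤ (PySem.List.enumerate cs).countP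
      (fun p => p.2 == c && (p.1 == 0 || !(PySem.List.pyGetD cs (p.1 - 1) ' ' == c))))
  if answer ≠ [] then String.ofList answer else "N"

-- ===== PRECONDITION & SPEC =====
-- Pre_ excludes only the empty string, on which A raises IndexError at input_string[0].
def Pre_solution (input_string : String) : Prop := input_string ≠ ""
instance (input_string : String) : Decidable (Pre_solution input_string) := by unfold Pre_solution; infer_instance
def pvWitness_solution : String := "aabcc"

def Spec_solution (input_string : String) (out : String) : Prop := out = solution_alt input_string
instance (input_string : String) (out : String) : Decidable (Spec_solution input_string out) := by unfold Spec_solution; infer_instance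

-- ===== CLAIM (what is proved, stated in full; the proofs are below) =====
def Claim_equal_solution : Prop := ∀ (input_string : String), Dom_solution input_string → Pre_solution input_string → Spec_solution input_string (solution input_string)

-- ===== LEMMAS AND PROOFS =====

-- run-start count of c in l when the character just before l is `prev` (none = start of string)
def pvRsc (prev : Option Char) (l : List Char) (c : Char) : Nat :=
  match l with
  | [] => 0
  | x :: l => (if x = c ∧ prev ≠ some c then 1 else 0) + pvRsc (some x) l c

-- B's inner counted scan computes pvRsc.
theorem pv_enum_rsc (c : Char) (cs : List Char) : ∀ (l pre : List Char), cs = pre ++ l →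
    (PySem.List.enumerate l (pre.length : Int)).countP
      (fun p => p.2 == c && (p.1 == 0 || !(PySem.List.pyGetD cs (p.1 - 1) ' ' == c)))
    = pvRsc pre.getLast? l c := by
  intro l
  induction l with
  | nil => intro pre _; simp [PySem.List.enumerate_nil, pvRsc]
  | cons x l ih =>
    intro pre hcs
    rw [PySem.List.enumerate_cons, List.countP_cons]
    have hrec := ih (pre ++ [x]) (by simp [hcs])
    have hlen : (((pre ++ [x]).length : Nat) : Int) = (pre.length : Int) + 1 := by
      simp
    rw [hlen] at hrec
    rw [hrec]
    have hgl2 : (pre ++ [x]).getLast? = some x := by simp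
    rw [hgl2]
    by_cases hpre : pre = []
    · subst hpre
      by_cases hxc : x = c
      · simp [pvRsc, hxc]; omega
      · simp [pvRsc, hxc]
    · have hlast? : pre.getLast? = some (pre.getLast hpre) := List.getLast?_eq_some_getLast hpre
      have h0 : ((pre.length : Int) == 0) = false := by
        simp
        omega
      have hcast : ((pre.length : Int) - 1) = (((pre.length - 1 : Nat)) : Int) := by
        have := List.length_pos_of_ne_nil hpre
        omega
      have hget : PySem.List.pyGetD cs ((pre.length : Int) - 1) ' ' = pre.getLast hpre := by
        rw [hcast, PySem.List.pyGetD_natCast, hcs]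
        have hlt : pre.length - 1 < pre.length := by
          have := List.length_pos_of_ne_nil hpre
          omega
        rw [List.getD_eq_getElem?_getD, List.getElem?_append_left (by omega)]
        rw [List.getElem?_eq_getElem hlt]
        simp [List.getLast_eq_getElem]
      simp only [h0, hget, hlast?, pvRsc]
      by_cases hxc : x = c
      · by_cases hgc : pre.getLast hpre = c
        · simp [hxc, hgc]
        · simp [hxc, hgc]; omega
      · simp [hxc]

-- A's collapse fold: count of c = count in the seed plus run starts of c in the rest.
theorem pv_fold_count (c : Char) : ∀ (l stack : List Char) (hne : stack ≠ []),
    (l.foldl (fun st al => if PySem.List.pyGetD st (-1) ' ' ≠ al then st ++ [al] else st) stack).count c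
    = stack.count c + pvRsc (some (stack.getLast hne)) l c := by
  intro l
  induction l with
  | nil => intro stack hne; simp [pvRsc]
  | cons al l ih =>
    intro stack hne
    simp only [List.foldl_cons]
    rw [PySem.List.pyGetD_neg_one stack ' ' hne]
    by_cases h : stack.getLast hne = al
    · rw [if_neg (by simp [h])]
      rw [ih stack hne]
      by_cases hac : al = c
      · subst hac; simp [pvRsc, h]
      · simp [pvRsc, hac, h]
    · rw [if_pos h]
      have hne' : stack ++ [al] ≠ [] := by simp
      rw [ih (stack ++ [al]) hne']
      have hlast : (stack ++ [al]).getLast hne' = al := by simp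
      rw [hlast]
      by_cases hac : al = c
      · subst hac; simp [pvRsc, List.count_append, h]; omega
      · simp [pvRsc, List.count_append, hac]

-- A's collapse fold: same members as seed plus the rest.
theorem pv_fold_mem (x : Char) : ∀ (l stack : List Char), stack ≠ [] →
    (x ∈ l.foldl (fun st al => if PySem.List.pyGetD st (-1) ' ' ≠ al then st ++ [al] else st) stack
      ↔ x ∈ stack ∨ x ∈ l) := by
  intro l
  induction l with
  | nil => intro stack hne; simp
  | cons al l ih =>
    intro stack hne
    simp only [List.foldl_cons]
    rw [PySem.List.pyGetD_neg_one stack ' ' hne]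
    by_cases h : stack.getLast hne = al
    · rw [if_neg (by simp [h])]
      rw [ih stack hne]
      have : al ∈ stack := h ▸ List.getLast_mem hne
      constructor
      · rintro (hs | hl); exacts [Or.inl hs, Or.inr (List.mem_cons_of_mem _ hl)]
      · rintro (hs | hl)
        · exact Or.inl hs
        · rcases List.mem_cons.mp hl with rfl | hl
          exacts [Or.inl this, Or.inr hl]
    · rw [if_pos h]
      rw [ih (stack ++ [al]) (by simp)]
      simp [or_assoc]

theorem solution_spec_aux (input_string : String) (h : input_string.toList ≠ []) :
    solution input_string = solution_alt input_string := by
  obtain ⟨c0, rest, hcs⟩ := List.exists_cons_of_ne_nil h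
  unfold solution solution_alt
  simp only []
  have hseed : PySem.List.pyGetD input_string.toList 0 ' ' = c0 := by
    rw [hcs]; exact PySem.List.pyGetD_zero_cons c0 rest ' '
  rw [hseed]
  set cs := input_string.toList with hcsdef
  set stack := cs.foldl
    (fun st al => if PySem.List.pyGetD st (-1) ' ' ≠ al then st ++ [al] else st) [c0] with hstack
  have hne0 : ([c0] : List Char) ≠ [] := by simp
  have hc0mem : c0 ∈ cs := by rw [hcs]; exact List.mem_cons_self
  -- run-start counts: A's collapsed stack counts = B's counted scans
  have hcount : ∀ x, stack.count x = pvRsc none cs x := by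
    intro x
    rw [hstack, pv_fold_count x cs [c0] hne0, hcs]
    by_cases hx : c0 = x <;> simp [pvRsc, List.getLast, hx]
  have hcntB : ∀ x, (PySem.List.enumerate cs).countP
      (fun p => p.2 == x && (p.1 == 0 || !(PySem.List.pyGetD cs (p.1 - 1) ' ' == x)))
      = pvRsc none cs x := by
    intro x
    have := pv_enum_rsc x cs cs [] rfl
    simpa using this
  have hmem : ∀ x, x ∈ stack ↔ x ∈ cs := by
    intro x
    rw [hstack, pv_fold_mem x cs [c0] hne0]
    constructor
    · rintro (h1 | h1)
      · rcases List.mem_singleton.mp h1 with rfl; exact hc0mem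
      · exact h1
    · exact Or.inr
  -- A's answer loop is a filter over the distinct chars of the stack
  have hA : (PySem.Set.ofList stack).foldl
      (fun ans i => if 2 ≤ stack.count i then ans ++ [i] else ans) []
      = (PySem.Set.ofList stack).filter (fun i => decide (2 ≤ stack.count i)) := by
    have hfn : (fun (ans : List Char) i => if 2 ≤ stack.count i then ans ++ [i] else ans)
        = (fun ans i => if (decide (2 ≤ stack.count i)) = true then ans ++ [id i] else ans) := by
      funext ans i; simp
    rw [hfn, PySem.List.foldl_append_if, List.map_id]
    simp
  rw [hA]
  -- the two filters test the same predicate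
  have hpred : (fun (x : Char) => decide (2 ≤ (PySem.List.enumerate cs).countP
      (fun p => p.2 == x && (p.1 == 0 || !(PySem.List.pyGetD cs (p.1 - 1) ' ' == x)))))
      = (fun (x : Char) => decide (2 ≤ stack.count x)) := by
    funext x; rw [hcntB x, ← hcount x]
  rw [hpred]
  -- B's answer is a permutation of A's, and strictly increasing
  have hperm : (PySem.Set.ofList cs).Perm (PySem.Set.ofList stack) := by
    rw [List.perm_ext_iff_of_nodup (PySem.Set.nodup_ofList cs) (PySem.Set.nodup_ofList stack)]
    intro a
    rw [PySem.Set.mem_ofList, PySem.Set.mem_ofList, hmem]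
  have hpermAns : ((PySem.List.sorted (PySem.Set.ofList cs) (fun x => x) false).filter
        (fun x => decide (2 ≤ stack.count x))).Perm
      ((PySem.Set.ofList stack).filter (fun x => decide (2 ≤ stack.count x))) :=
    ((PySem.List.sorted_perm (PySem.Set.ofList cs) (fun x => x) false).trans hperm).filter _
  have hpair : ((PySem.List.sorted (PySem.Set.ofList cs) (fun x => x) false).filter
      (fun x => decide (2 ≤ stack.count x))).Pairwise (· < ·) :=
    (PySem.List.sorted_ofList_pairwise_lt cs).filter _
  have hsorted := PySem.List.sorted_eq_of_perm_of_pairwise_lt _ _ (fun x => x) hpermAns hpair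
  by_cases hnil : (PySem.Set.ofList stack).filter (fun x => decide (2 ≤ stack.count x)) = []
  · have hnilB : (PySem.List.sorted (PySem.Set.ofList cs) (fun x => x) false).filter
        (fun x => decide (2 ≤ stack.count x)) = [] := List.Perm.eq_nil (hnil ▸ hpermAns)
    rw [if_pos hnil, hnilB]
    simp
  · have hnilB : ¬ ((PySem.List.sorted (PySem.Set.ofList cs) (fun x => x) false).filter
        (fun x => decide (2 ≤ stack.count x)) = []) := fun e => hnil (List.Perm.eq_nil (e ▸ hpermAns.symm))
    rw [if_neg hnil, if_pos hnilB, hsorted]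

-- ===== VERDICT (by name: the statement is the Claim_ definition above) =====
theorem solution_spec : Claim_equal_solution := by
  intro input_string _ hpre
  unfold Spec_solution
  unfold Pre_solution at hpre
  exact solution_spec_aux input_string (fun hnil => hpre (String.toList_inj.mp (by rw [hnil]; rfl)))
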